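-- pv_equiv track=rewrite | github.com/Chandan25sharma/Neurosymbolic-agent | reasoning_engine/inference_engine.py | _generate_conclusion
-- ===== SOURCE A (Python) =====
-- from typing import Dict, List, Any, Tuple, Set, Optional
--
-- def _generate_conclusion(template: str, premises: List[str]) -> str:
--     """
--     Generate conclusion from template and premises
--
--     Args:
--         template: Conclusion template
--         premises: List of premises
--
--     Returns:
--         Generated conclusion
--     """
--     # Simple template substitution
--     # In a more advanced system, this would use more sophisticated NLG
--
--     if "{substance}" in template:
--         # Find substance-related premise
--         substance = "unknown_substance"
--         for premise in premises:
--             if "SUBSTANCE" in premise: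
--                 substance = premise
--                 break
--         template = template.replace("{substance}", substance)
--
--     if "{risk_level}" in template:
--         # Find risk-related premise
--         risk_level = "unknown_risk"
--         for premise in premises:
--             if "RISK" in premise:
--                 risk_level = premise
--                 break
--         template = template.replace("{risk_level}", risk_level)
--
--     if "{confidence}" in template:
--         # Find confidence-related premise
--         confidence_level = "medium_confidence"
--         for premise in premises:
--             if "CONFIDENCE" in premise:
--                 confidence_level = premise
--                 break
--         template = template.replace("{confidence}", confidence_level)
--
--     return template
-- ===== SOURCE B (Python) =====
-- def _generate_conclusion(template, premises):
--     # table-driven: (placeholder, keyword, default) in substitution order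
--     table = [("{substance}", "SUBSTANCE", "unknown_substance"),
--              ("{risk_level}", "RISK", "unknown_risk"),
--              ("{confidence}", "CONFIDENCE", "medium_confidence")]
--     # one pass over premises: first premise containing each keyword
--     found = {}
--     for premise in premises:
--         for _, kw, _ in table:
--             if kw not in found and kw in premise:
--                 found[kw] = premise
--     for placeholder, kw, default in table:
--         if placeholder in template:
--             template = template.replace(placeholder, found.get(kw, default))
--     return template
-- ===== Notes on version B (the rewrite author's own statement) =====
-- stated objective: simpler
-- what changed: Replaces the three copy-pasted scan-and-substitute blocks with a (placeholder, keyword, default) table, a single pass over the premises recording the first premise containing each keyword, and one table-driven replacement loop.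
import Mathlib
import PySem

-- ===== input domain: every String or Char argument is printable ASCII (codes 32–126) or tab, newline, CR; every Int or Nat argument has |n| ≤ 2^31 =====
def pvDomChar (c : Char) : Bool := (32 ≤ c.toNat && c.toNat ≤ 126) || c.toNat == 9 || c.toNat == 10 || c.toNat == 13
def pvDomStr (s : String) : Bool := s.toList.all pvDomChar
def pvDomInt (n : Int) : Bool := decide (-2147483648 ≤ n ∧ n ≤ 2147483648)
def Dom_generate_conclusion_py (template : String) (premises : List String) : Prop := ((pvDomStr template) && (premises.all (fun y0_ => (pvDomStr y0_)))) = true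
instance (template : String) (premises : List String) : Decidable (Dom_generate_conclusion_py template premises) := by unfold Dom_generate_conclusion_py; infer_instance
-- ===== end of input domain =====

-- B replaces A's three copy-pasted scan-and-substitute blocks with a (placeholder, keyword, default)
-- table, one pass over the premises recording the first premise containing each keyword, and a
-- table-driven replacement loop (objective: simpler).

-- ===== PORT A =====
-- 'for premise in premises: if kw in premise: v = premise; break' with default v
def pyFindFirstA (kw deflt : String) : List String → String
  | [] => deflt
  | p :: rest => if PySem.Str.isIn kw p then p else pyFindFirstA kw deflt rest

def generate_conclusion_py (template : String) (premises : List String) : String :=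
  let t1 := if PySem.Str.isIn "{substance}" template then
      PySem.Str.replace template "{substance}" (pyFindFirstA "SUBSTANCE" "unknown_substance" premises)
    else template
  let t2 := if PySem.Str.isIn "{risk_level}" t1 then
      PySem.Str.replace t1 "{risk_level}" (pyFindFirstA "RISK" "unknown_risk" premises)
    else t1
  let t3 := if PySem.Str.isIn "{confidence}" t2 then
      PySem.Str.replace t2 "{confidence}" (pyFindFirstA "CONFIDENCE" "medium_confidence" premises)
    else t2
  t3

-- ===== PORT B =====
def bTable : List (String × String × String) :=
  [("{substance}", "SUBSTANCE", "unknown_substance"),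
   ("{risk_level}", "RISK", "unknown_risk"),
   ("{confidence}", "CONFIDENCE", "medium_confidence")]

-- body of the inner loop of the single premise pass
def bStep1 (p : String) (d : PySem.Dict String String) (e : String × String × String) :
    PySem.Dict String String :=
  if (PySem.Dict.get? d e.2.1).isNone && PySem.Str.isIn e.2.1 p then
    PySem.Dict.insert d e.2.1 p
  else d

-- inner loop of the single premise pass: record each keyword's first matching premise
def bStep (d : PySem.Dict String String) (p : String) : PySem.Dict String String :=
  bTable.foldl (bStep1 p) d

def generate_conclusion_py_alt (template : String) (premises : List String) : String :=
  let found := premises.foldl bStep PySem.Dict.empty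
  bTable.foldl
    (fun t e =>
      if PySem.Str.isIn e.1 t then
        PySem.Str.replace t e.1 (PySem.Dict.getD found e.2.1 e.2.2)
      else t) template

-- ===== PRECONDITION & SPEC =====
def Spec_generate_conclusion_py (template : String) (premises : List String) (out : String) : Prop := out = generate_conclusion_py_alt template premises
instance (template : String) (premises : List String) (out : String) : Decidable (Spec_generate_conclusion_py template premises out) := by unfold Spec_generate_conclusion_py; infer_instance

-- ===== CLAIM (what is proved, stated in full; the proofs are below) =====
def Claim_equal_generate_conclusion_py : Prop := ∀ (template : String) (premises : List String), Dom_generate_conclusion_py template premises → Spec_generate_conclusion_py template premises (generate_conclusion_py template premises)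

-- ===== LEMMAS AND PROOFS =====

-- A's scan loop is find?-with-default
theorem pyFindFirstA_eq_find? (kw deflt : String) (l : List String) :
    pyFindFirstA kw deflt l = ((l.find? (fun p => PySem.Str.isIn kw p)).getD deflt) := by
  induction l with
  | nil => rfl
  | cons p rest ih =>
    by_cases h : PySem.Str.isIn kw p
    · simp only [PySem.Str.isIn_eq] at h
      simp [pyFindFirstA, List.find?, h]
    · simp only [Bool.not_eq_true, PySem.Str.isIn_eq] at h
      simp [pyFindFirstA, List.find?, h, ih]

-- one conditional insert: how it answers get? for its own key and for any other key
theorem get?_bStep1_self (p : String) (d : PySem.Dict String String)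
    (e : String × String × String) :
    PySem.Dict.get? (bStep1 p d e) e.2.1 =
      (PySem.Dict.get? d e.2.1).or (if PySem.Str.isIn e.2.1 p then some p else none) := by
  unfold bStep1
  rcases hv : PySem.Dict.get? d e.2.1 with _ | v <;> split_ifs <;>
    simp_all [PySem.Dict.get?_insert_self, Option.or]

theorem get?_bStep1_ne (p : String) (d : PySem.Dict String String)
    (e : String × String × String) {kw : String} (hne : kw ≠ e.2.1) :
    PySem.Dict.get? (bStep1 p d e) kw = PySem.Dict.get? d kw := by
  unfold bStep1
  split_ifs
  · exact PySem.Dict.get?_insert_of_ne _ _ hne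
  · rfl

-- B's single pass records, for each table keyword, the first matching premise
theorem get?_foldl_bStep (premises : List String) (d : PySem.Dict String String)
    (kw : String) (hkw : kw = "SUBSTANCE" ∨ kw = "RISK" ∨ kw = "CONFIDENCE") :
    PySem.Dict.get? (premises.foldl bStep d) kw =
      (PySem.Dict.get? d kw).or (premises.find? (fun p => PySem.Str.isIn kw p)) := by
  induction premises generalizing d with
  | nil => simp
  | cons p rest ih =>
    have hstep : PySem.Dict.get? (bStep d p) kw =
        (PySem.Dict.get? d kw).or (if PySem.Str.isIn kw p then some p else none) := by
      have hunf : bStep d p =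
          bStep1 p (bStep1 p (bStep1 p d ("{substance}", "SUBSTANCE", "unknown_substance"))
            ("{risk_level}", "RISK", "unknown_risk"))
            ("{confidence}", "CONFIDENCE", "medium_confidence") := rfl
      rw [hunf]
      rcases hkw with h | h | h <;> subst h
      · rw [get?_bStep1_ne _ _ _ (by decide), get?_bStep1_ne _ _ _ (by decide),
          get?_bStep1_self]
      · rw [get?_bStep1_ne _ _ _ (by decide), get?_bStep1_self,
          get?_bStep1_ne _ _ _ (by decide)]
      · rw [get?_bStep1_self, get?_bStep1_ne _ _ _ (by decide),
          get?_bStep1_ne _ _ _ (by decide)]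
    rw [List.foldl_cons, ih (bStep d p), hstep, List.find?]
    by_cases h : PySem.Str.isIn kw p
    · simp only [PySem.Str.isIn_eq] at h
      simp [h]
    · simp only [Bool.not_eq_true, PySem.Str.isIn_eq] at h
      simp [h]

-- ===== VERDICT (by name: the statement is the Claim_ definition above) =====
theorem generate_conclusion_py_spec : Claim_equal_generate_conclusion_py := by
  intro template premises _
  unfold Spec_generate_conclusion_py generate_conclusion_py generate_conclusion_py_alt
  have hval : ∀ kw deflt, kw = "SUBSTANCE" ∨ kw = "RISK" ∨ kw = "CONFIDENCE" →
      PySem.Dict.getD (premises.foldl bStep PySem.Dict.empty) kw deflt =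
        pyFindFirstA kw deflt premises := by
    intro kw deflt hkw
    rw [PySem.Dict.getD_eq_get?_getD, get?_foldl_bStep premises _ kw hkw,
      pyFindFirstA_eq_find? kw deflt premises]
    simp [Option.or]
  simp only [bTable, List.foldl]
  rw [hval "SUBSTANCE" "unknown_substance" (Or.inl rfl),
    hval "RISK" "unknown_risk" (Or.inr (Or.inl rfl)),
    hval "CONFIDENCE" "medium_confidence" (Or.inr (Or.inr rfl))]
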